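-- pv_equiv track=rewrite | github.com/lesvieuxsinges/swiss_calculator | libs.py | sumsplit
-- ===== SOURCE A (Python) =====
-- def sumsplit(x):
-- 	x=list(x)
--
-- 	#this while adds a + before every -, so we can use the + to split it without losing data
-- 	i=0
-- 	while i < len(x):
-- 		if x[i]=='-':
-- 			x.insert(i, '+')
-- 			i+=1
-- 		i+=1
-- 	x=''.join(x).split('+')
-- 	return x
-- ===== SOURCE B (Python) =====
-- def sumsplit(x):
-- 	# single-pass tokenizer: emit tokens directly, no sentinel insertion, no join/split
-- 	result = []
-- 	cur = ''
-- 	for ch in x: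
-- 		if ch == '+':
-- 			result.append(cur)
-- 			cur = ''
-- 		elif ch == '-':
-- 			result.append(cur)
-- 			cur = '-'
-- 		else:
-- 			cur += ch
-- 	result.append(cur)
-- 	return result
-- ===== Notes on version B (the rewrite author's own statement) =====
-- stated objective: simpler
-- what changed: B tokenizes in a single pass with a result/current-token accumulator, emitting tokens directly, instead of A's insert-'+'-sentinels-before-'-', join, then str.split('+').
import Mathlib
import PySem

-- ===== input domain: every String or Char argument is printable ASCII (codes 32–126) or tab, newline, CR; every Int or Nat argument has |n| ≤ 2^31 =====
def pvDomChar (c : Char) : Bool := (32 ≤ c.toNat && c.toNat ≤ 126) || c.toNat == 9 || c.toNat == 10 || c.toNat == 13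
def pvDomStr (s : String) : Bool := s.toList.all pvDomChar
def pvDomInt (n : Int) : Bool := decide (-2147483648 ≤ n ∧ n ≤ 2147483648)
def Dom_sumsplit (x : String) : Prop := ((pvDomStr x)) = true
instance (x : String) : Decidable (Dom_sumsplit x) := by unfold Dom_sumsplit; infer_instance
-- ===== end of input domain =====

-- B is a single-pass tokenizer emitting tokens directly (simpler decomposition);
-- A inserts '+' sentinels before each '-', joins and splits on '+'.

-- ===== PORT A =====
-- the while loop: walk the char list, inserting a '+' before every '-' and skipping past both
def sumsplitInsert : List Char → List Char
  | [] => []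
  | c :: cs => if c = '-' then '+' :: '-' :: sumsplitInsert cs else c :: sumsplitInsert cs

-- ''.join(x).split('+') : split the joined chars on the nonempty separator "+"
def sumsplit (x : String) : List String :=
  (PySem.Chars.splitOn (sumsplitInsert x.toList) ['+']).map String.mk

-- ===== PORT B =====
-- Source B's loop: result/cur accumulator over the characters (cur, a Python str, modeled as its chars)
def sumsplitAltGo : List Char → List String → List Char → List String
  | [], res, cur => res ++ [String.mk cur]
  | c :: cs, res, cur =>
    if c = '+' then sumsplitAltGo cs (res ++ [String.mk cur]) []
    else if c = '-' then sumsplitAltGo cs (res ++ [String.mk cur]) ['-']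
    else sumsplitAltGo cs res (cur ++ [c])

def sumsplit_alt (x : String) : List String := sumsplitAltGo x.toList [] []

-- ===== PRECONDITION & SPEC =====
def Spec_sumsplit (x : String) (out : List String) : Prop := out = sumsplit_alt x
instance (x : String) (out : List String) : Decidable (Spec_sumsplit x out) := by unfold Spec_sumsplit; infer_instance

-- ===== CLAIM (what is proved, stated in full; the proofs are below) =====
def Claim_equal_sumsplit : Prop := ∀ (x : String), Dom_sumsplit x → Spec_sumsplit x (sumsplit x)

-- ===== LEMMAS AND PROOFS =====

-- simple recursive characterization of splitting on '+'
def mySplit : List Char → List (List Char)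
  | [] => [[]]
  | c :: cs =>
    if c = '+' then [] :: mySplit cs
    else match mySplit cs with
      | [] => [[c]]
      | h :: t => (c :: h) :: t

def consHead (a : List Char) : List (List Char) → List (List Char)
  | [] => [a]
  | h :: t => (a ++ h) :: t

theorem mySplit_ne_nil (cs : List Char) : mySplit cs ≠ [] := by
  cases cs with
  | nil => simp [mySplit]
  | cons c cs =>
    simp only [mySplit]
    split
    · simp
    · split <;> simp

theorem splitOn_go_plus (fuel : Nat) (l cur : List Char) (acc : List (List Char))
    (h : l.length ≤ fuel) :
    PySem.Chars.splitOn.go ['+'] fuel l cur acc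
      = acc.reverse ++ consHead cur.reverse (mySplit l) := by
  induction fuel generalizing l cur acc with
  | zero =>
    have : l = [] := by cases l <;> simp_all
    subst this
    simp [PySem.Chars.splitOn.go, mySplit, consHead]
  | succ n ih =>
    cases l with
    | nil => simp [PySem.Chars.splitOn.go, mySplit, consHead]
    | cons c rest =>
      rw [PySem.Chars.splitOn.go]
      by_cases hc : c = '+'
      · subst hc
        have hp : List.isPrefixOf ['+'] ('+' :: rest) = true := by
          simp [List.isPrefixOf]
        simp only [hp, if_true, List.length_nil, Nat.zero_add, List.drop_succ_cons,
          List.drop_zero, List.length_cons] at *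
        rw [ih rest [] (cur.reverse :: acc) (by omega)]
        simp only [mySplit, if_pos rfl, consHead, List.reverse_cons, List.reverse_nil]
        rcases hm : mySplit rest with _ | ⟨h1, t1⟩
        · exact absurd hm (mySplit_ne_nil rest)
        · simp [consHead]
      · have hp : List.isPrefixOf ['+'] (c :: rest) = false := by
          simp [List.isPrefixOf]; intro h'; exact hc h'.symm
        simp only [hp, Bool.false_eq_true, if_false, List.drop_succ_cons, List.drop_zero]
        rw [ih rest (c :: cur) acc (by simp at h ⊢; omega)]
        simp only [mySplit, if_neg hc]
        rcases hm : mySplit rest with _ | ⟨h1, t1⟩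
        · exact absurd hm (mySplit_ne_nil rest)
        · simp [consHead]

theorem splitOn_plus (l : List Char) :
    PySem.Chars.splitOn l ['+'] = mySplit l := by
  have := splitOn_go_plus (l.length + 1) l [] [] (by omega)
  rw [PySem.Chars.splitOn] at *
  rw [this]
  rcases hm : mySplit l with _ | ⟨h1, t1⟩
  · exact absurd hm (mySplit_ne_nil l)
  · simp [consHead]

theorem altGo_eq (cs : List Char) (res : List String) (cur : List Char) :
    sumsplitAltGo cs res cur
      = res ++ (consHead cur (mySplit (sumsplitInsert cs))).map String.mk := by
  induction cs generalizing res cur with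
  | nil => simp [sumsplitAltGo, sumsplitInsert, mySplit, consHead]
  | cons c cs ih =>
    by_cases hp : c = '+'
    · subst hp
      rw [sumsplitAltGo, if_pos rfl, ih]
      simp only [sumsplitInsert]
      rw [if_neg (by decide)]
      simp only [mySplit, if_pos rfl]
      rcases hm : mySplit (sumsplitInsert cs) with _ | ⟨h1, t1⟩
      · exact absurd hm (mySplit_ne_nil _)
      · simp [consHead]
    · by_cases hmns : c = '-'
      · subst hmns
        rw [sumsplitAltGo, if_neg (by decide), if_pos rfl, ih]
        rw [show sumsplitInsert ('-' :: cs) = '+' :: '-' :: sumsplitInsert cs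
          from by simp [sumsplitInsert]]
        rcases hm : mySplit (sumsplitInsert cs) with _ | ⟨h1, t1⟩
        · exact absurd hm (mySplit_ne_nil _)
        · have hsp : mySplit ('+' :: '-' :: sumsplitInsert cs)
              = [] :: ('-' :: h1) :: t1 := by
            simp [mySplit, hm]
          rw [hsp]
          simp [consHead]
      · rw [sumsplitAltGo, if_neg hp, if_neg hmns, ih]
        simp only [sumsplitInsert, if_neg hmns, mySplit, if_neg hp]
        rcases hm : mySplit (sumsplitInsert cs) with _ | ⟨h1, t1⟩
        · exact absurd hm (mySplit_ne_nil _)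
        · simp [consHead]

-- ===== VERDICT (by name: the statement is the Claim_ definition above) =====
theorem sumsplit_spec : Claim_equal_sumsplit := by
  intro x _
  unfold Spec_sumsplit sumsplit sumsplit_alt
  rw [altGo_eq, splitOn_plus]
  rcases hm : mySplit (sumsplitInsert x.toList) with _ | ⟨h1, t1⟩
  · exact absurd hm (mySplit_ne_nil _)
  · simp [consHead]
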